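-- pv_equiv track=rewrite | github.com/nexodifyforyou/perizia-v5-after-gpt | backend/scripts/regression_golden_1859886.py | _collapse_spaced_letters
-- ===== SOURCE A (Python) =====
-- def _collapse_spaced_letters(tokens: list[str]) -> list[str]:
--     collapsed = []
--     buffer = []
--     for token in tokens:
--         if len(token) == 1 and token.isalpha():
--             buffer.append(token)
--             continue
--         if buffer:
--             collapsed.append("".join(buffer))
--             buffer = []
--         collapsed.append(token)
--     if buffer:
--         collapsed.append("".join(buffer))
--     return collapsed
-- ===== SOURCE B (Python) =====
-- def _collapse_spaced_letters(tokens: list[str]) -> list[str]: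
--     # Right-to-left pass: a single-letter token either starts a new word or is
--     # prepended onto the word being grown at the end of rev; reverse at the end.
--     rev = []
--     run = False
--     for token in reversed(tokens):
--         if len(token) == 1 and token.isalpha():
--             if run:
--                 rev[-1] = token + rev[-1]
--             else:
--                 rev.append(token)
--                 run = True
--         else:
--             rev.append(token)
--             run = False
--     rev.reverse()
--     return rev
-- ===== Notes on version B (the rewrite author's own statement) =====
-- stated objective: alternative
-- what changed: A scans left-to-right buffering letters and flushing the buffer with join; B scans right-to-left with no buffer, prepending each single-letter token onto the word currently growing at the end of the output (or starting a new word), then reverses the result.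
import Mathlib
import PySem

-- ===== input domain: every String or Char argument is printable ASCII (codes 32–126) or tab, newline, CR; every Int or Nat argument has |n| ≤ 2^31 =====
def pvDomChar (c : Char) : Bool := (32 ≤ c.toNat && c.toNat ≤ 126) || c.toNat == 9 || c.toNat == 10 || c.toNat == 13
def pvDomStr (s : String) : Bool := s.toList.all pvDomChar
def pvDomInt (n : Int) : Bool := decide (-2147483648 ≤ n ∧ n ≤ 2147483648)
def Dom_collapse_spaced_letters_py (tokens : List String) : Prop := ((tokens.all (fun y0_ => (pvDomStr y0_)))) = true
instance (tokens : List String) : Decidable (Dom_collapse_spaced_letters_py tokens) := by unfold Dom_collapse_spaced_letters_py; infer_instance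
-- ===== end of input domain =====

-- B replaces A's forward buffer/flush scan by a right-to-left pass that prepends each single
-- letter onto the word growing at the end of the output (alternative decomposition, same cost).


-- ===== PORT A =====
-- the test 'len(token) == 1 and token.isalpha()'
def pvKey (t : String) : Bool := PySem.Str.len t == 1 && PySem.Str.strIsalpha t

-- A's loop state: (collapsed, buffer)
def pvStepA (st : List String × List String) (token : String) : List String × List String :=
  if pvKey token then (st.1, st.2 ++ [token])
  else
    let collapsed := if st.2 ≠ [] then st.1 ++ [PySem.Str.join "" st.2] else st.1
    (collapsed ++ [token], [])

def collapse_spaced_letters_py (tokens : List String) : List String :=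
  let st := tokens.foldl pvStepA ([], [])
  if st.2 ≠ [] then st.1 ++ [PySem.Str.join "" st.2] else st.1

-- ===== PORT B =====
-- B's loop state: (rev, run); 'rev[-1] = token + rev[-1]' is 'dropLast ++ [token ++ last]'
-- (when run = true, rev is nonempty, so the getLastD default is never used)
def pvStepB (st : List String × Bool) (token : String) : List String × Bool :=
  if pvKey token then
    if st.2 then (st.1.dropLast ++ [token ++ st.1.getLastD ""], true)
    else (st.1 ++ [token], true)
  else (st.1 ++ [token], false)

def collapse_spaced_letters_py_alt (tokens : List String) : List String :=
  (tokens.reverse.foldl pvStepB ([], false)).1.reverse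

-- ===== PRECONDITION & SPEC =====
def Spec_collapse_spaced_letters_py (tokens : List String) (out : List String) : Prop := out = collapse_spaced_letters_py_alt tokens
instance (tokens : List String) (out : List String) : Decidable (Spec_collapse_spaced_letters_py tokens out) := by unfold Spec_collapse_spaced_letters_py; infer_instance

-- ===== CLAIM (what is proved, stated in full; the proofs are below) =====
def Claim_equal_collapse_spaced_letters_py : Prop := ∀ (tokens : List String), Dom_collapse_spaced_letters_py tokens → Spec_collapse_spaced_letters_py tokens (collapse_spaced_letters_py tokens)

-- ===== LEMMAS AND PROOFS =====

-- common intermediate: A's loop with an explicit pending buffer, written recursively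
def pvEmit : List String → List String → List String
  | buffer, [] => if buffer ≠ [] then [PySem.Str.join "" buffer] else []
  | buffer, t :: ts =>
    if pvKey t then pvEmit (buffer ++ [t]) ts
    else (if buffer ≠ [] then [PySem.Str.join "" buffer] else []) ++ t :: pvEmit [] ts

theorem pvA_foldl (ts : List String) : ∀ (c b : List String),
    (let st := ts.foldl pvStepA (c, b);
     if st.2 ≠ [] then st.1 ++ [PySem.Str.join "" st.2] else st.1) = c ++ pvEmit b ts := by
  induction ts with
  | nil =>
    intro c b
    simp only [List.foldl_nil, pvEmit]
    split <;> simp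
  | cons t ts ih =>
    intro c b
    simp only [List.foldl_cons, pvEmit, pvStepA]
    by_cases hk : pvKey t
    · simp only [hk, if_pos]
      exact ih c (b ++ [t])
    · simp only [hk, if_false, Bool.false_eq_true]
      rw [ih]
      split <;> simp

theorem pvJoin_singleton (s : String) : PySem.Str.join "" [s] = s := by
  apply String.toList_injective
  simp [PySem.Str.toList_join, PySem.Chars.join, List.intercalate]

theorem pvJoin_cons (s : String) (l : List String) :
    PySem.Str.join "" (s :: l) = s ++ PySem.Str.join "" l := by
  apply String.toList_injective
  cases l with
  | nil => simp [PySem.Str.toList_join, PySem.Chars.join, List.intercalate]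
  | cons b l => simp [PySem.Str.toList_join, PySem.Chars.join_cons_cons]

theorem pvEmit_run (ts : List String) : ∀ (b : List String), b ≠ [] →
    pvEmit b ts = PySem.Str.join "" (b ++ ts.takeWhile pvKey) :: pvEmit [] (ts.dropWhile pvKey) := by
  induction ts with
  | nil => intro b hb; simp [pvEmit, hb]
  | cons t ts ih =>
    intro b hb
    by_cases hk : pvKey t
    · simp only [pvEmit, hk, if_true, List.takeWhile_cons_of_pos hk, List.dropWhile_cons_of_pos hk]
      rw [ih (b ++ [t]) (by simp)]
      simp
    · rw [List.takeWhile_cons_of_neg hk, List.dropWhile_cons_of_neg hk]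
      simp [pvEmit, hk, hb]

-- B's scan read from the right: structural recursion computing (output, run-bit)
def pvG : List String → List String × Bool
  | [] => ([], false)
  | t :: ts =>
    let st := pvG ts
    if pvKey t then
      if st.2 then ((t ++ st.1.headD "") :: st.1.tail, true)
      else (t :: st.1, true)
    else (t :: st.1, false)

def pvHeadKey : List String → Bool
  | [] => false
  | t :: _ => pvKey t

theorem pvG_spec (ts : List String) : pvG ts = (pvEmit [] ts, pvHeadKey ts) := by
  induction ts with
  | nil => simp [pvG, pvEmit, pvHeadKey]
  | cons t ts ih =>
    by_cases hk : pvKey t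
    · cases ts with
      | nil => simp [pvG, pvEmit, pvHeadKey, hk, pvJoin_singleton]
      | cons u us =>
        by_cases hu : pvKey u
        · rw [pvG, ih]
          simp only [pvHeadKey, hu, hk, if_true, pvEmit, List.nil_append, List.cons_append]
          rw [pvEmit_run us [u] (by simp), pvEmit_run us [t, u] (by simp)]
          simp [pvJoin_cons t (u :: us.takeWhile pvKey)]
        · rw [pvG, ih]
          simp [pvHeadKey, hu, hk, pvEmit, pvJoin_singleton]
    · rw [pvG, ih]
      simp [pvHeadKey, hk, pvEmit]

theorem pvFoldB (ts : List String) :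
    ts.reverse.foldl pvStepB ([], false) = ((pvG ts).1.reverse, (pvG ts).2) := by
  induction ts with
  | nil => simp [pvG]
  | cons t ts ih =>
    rw [List.reverse_cons, List.foldl_append, ih]
    by_cases hk : pvKey t
    · by_cases hr : (pvG ts).2
      · simp [pvStepB, pvG, hk, hr]
      · simp [pvStepB, pvG, hk, hr]
    · simp [pvStepB, pvG, hk]

-- ===== VERDICT (by name: the statement is the Claim_ definition above) =====
theorem collapse_spaced_letters_py_spec : Claim_equal_collapse_spaced_letters_py := by
  intro tokens _
  show collapse_spaced_letters_py tokens = collapse_spaced_letters_py_alt tokens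
  unfold collapse_spaced_letters_py collapse_spaced_letters_py_alt
  rw [pvA_foldl tokens [] [], pvFoldB tokens, pvG_spec]
  simp
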